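-- pv_equiv track=rewrite | github.com/hyakumori/crm-server | hyakumori_crm/core/decorators.py | errors_wrapper
-- ===== SOURCE A (Python) =====
-- def errors_wrapper(errors):
--     error_dict = {}
--     for e in errors:
--         key = ".".join(e["loc"])
--         if key not in error_dict:
--             error_dict[key] = [e["msg"]]
--         else:
--             error_dict[key].append(e["msg"])
--     return error_dict
-- ===== SOURCE B (Python) =====
-- def errors_wrapper(errors):
--     pairs = [(".".join(e["loc"]), e["msg"]) for e in errors]
--     return {k: [m for k2, m in pairs if k2 == k]
--             for k in dict.fromkeys(k for k, _ in pairs)}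
-- ===== Notes on version B (the rewrite author's own statement) =====
-- stated objective: simpler
-- what changed: Replaces A's one-pass mutate-in-place dict grouping with a declarative two-stage comprehension: build the (key,msg) pair list once, dedup the keys in first-appearance order, and gather each group's messages by filtering the pair list per key.
import Mathlib
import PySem

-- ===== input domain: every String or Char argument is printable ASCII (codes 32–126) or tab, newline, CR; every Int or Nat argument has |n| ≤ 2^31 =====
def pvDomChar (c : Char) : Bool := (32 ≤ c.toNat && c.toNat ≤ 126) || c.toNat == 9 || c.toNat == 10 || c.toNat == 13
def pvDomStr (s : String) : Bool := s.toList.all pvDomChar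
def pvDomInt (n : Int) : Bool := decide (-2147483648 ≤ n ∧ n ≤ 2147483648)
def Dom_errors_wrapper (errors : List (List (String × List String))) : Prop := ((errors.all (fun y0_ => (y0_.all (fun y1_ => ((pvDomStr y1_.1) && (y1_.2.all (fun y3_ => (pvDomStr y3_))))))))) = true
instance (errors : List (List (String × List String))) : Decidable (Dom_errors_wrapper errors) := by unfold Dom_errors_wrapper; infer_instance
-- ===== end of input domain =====

-- B replaces A's one-pass mutate-in-place dict grouping with dedup-keys + per-key filter of a pair list (simpler, not faster).


-- ===== PORT A =====
-- e["loc"] / e["msg"]: first-match lookup on the association list (exact; KeyError = none, excluded by Pre_)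
def pvKey (e : List (String × List String)) : String :=
  PySem.Str.join "." (((PySem.Dict.mk e).get? "loc").getD [])

def pvMsg (e : List (String × List String)) : List String :=
  ((PySem.Dict.mk e).get? "msg").getD []

def errors_wrapper (errors : List (List (String × List String))) : List (String × List (List String)) :=
  (errors.foldl
    (fun d e =>
      let key := pvKey e
      if d.contains key = false then d.insert key [pvMsg e]
      else d.insert key (d.getD key [] ++ [pvMsg e]))
    (PySem.Dict.mk [])).items

-- ===== PORT B =====
def errors_wrapper_alt (errors : List (List (String × List String))) : List (String × List (List String)) :=
  let pairs := errors.map (fun e => (pvKey e, pvMsg e))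
  (PySem.List.dedup (pairs.map (·.1))).map
    (fun k => (k, (pairs.filter (fun p => p.1 == k)).map (·.2)))

-- ===== PRECONDITION & SPEC =====
-- Pre_ excludes exactly the inputs on which Python A raises KeyError: an error dict missing "loc" or "msg".
def Pre_errors_wrapper (errors : List (List (String × List String))) : Prop :=
  ∀ e ∈ errors, "loc" ∈ e.map Prod.fst ∧ "msg" ∈ e.map Prod.fst
instance (errors : List (List (String × List String))) : Decidable (Pre_errors_wrapper errors) := by unfold Pre_errors_wrapper; infer_instance

def pvWitness_errors_wrapper : (List (List (String × List String))) :=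
  [[("loc", ["a", "b"]), ("msg", ["oops"])], [("loc", ["a", "b"]), ("msg", ["again"])]]

def Spec_errors_wrapper (errors : List (List (String × List String))) (out : List (String × List (List String))) : Prop := out = errors_wrapper_alt errors
instance (errors : List (List (String × List String))) (out : List (String × List (List String))) : Decidable (Spec_errors_wrapper errors out) := by unfold Spec_errors_wrapper; infer_instance

-- ===== CLAIM (what is proved, stated in full; the proofs are below) =====
def Claim_equal_errors_wrapper : Prop := ∀ (errors : List (List (String × List String))), Dom_errors_wrapper errors → Pre_errors_wrapper errors → Spec_errors_wrapper errors (errors_wrapper errors)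

-- ===== LEMMAS AND PROOFS =====

-- A's loop body is exactly d[key] = d.get(key, []) + [msg], i.e. Dict.modify.
theorem pv_stepA_eq_modify (d : PySem.Dict String (List (List String))) (e : List (String × List String)) :
    (if d.contains (pvKey e) = false then d.insert (pvKey e) [pvMsg e]
     else d.insert (pvKey e) (d.getD (pvKey e) [] ++ [pvMsg e]))
    = d.modify (pvKey e) [] (· ++ [pvMsg e]) := by
  cases hc : d.contains (pvKey e) with
  | false => simp [PySem.Dict.modify, PySem.Dict.getD_of_not_contains, hc]
  | true => simp [PySem.Dict.modify]

theorem pv_foldl_eq_modify (l : List (List (String × List String)))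
    (d : PySem.Dict String (List (List String))) :
    l.foldl
      (fun d e =>
        let key := pvKey e
        if d.contains key = false then d.insert key [pvMsg e]
        else d.insert key (d.getD key [] ++ [pvMsg e])) d
    = l.foldl (fun d e => d.modify (pvKey e) [] (· ++ [pvMsg e])) d := by
  induction l generalizing d with
  | nil => rfl
  | cons e t ih =>
      simp only [List.foldl_cons]
      rw [pv_stepA_eq_modify, ih]

-- a dict with Nodup keys is its keys paired with their getD values
theorem pv_items_eq_keys_map {κ ν : Type} [BEq κ] [LawfulBEq κ]
    (d : PySem.Dict κ ν) (h : d.keys.Nodup) (v0 : ν) :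
    d.items = d.keys.map (fun k => (k, d.getD k v0)) := by
  simp only [PySem.Dict.keys]
  rw [List.map_map]
  conv_lhs => rw [show d.items = d.items.map id from (List.map_id _).symm]
  apply List.map_congr_left
  intro p hp
  have hg := PySem.Dict.getD_of_mem_items d (k := p.1) (v := p.2) (by simpa using hp) h v0
  simp [Function.comp, hg]

-- ===== VERDICT (by name: the statement is the Claim_ definition above) =====
theorem errors_wrapper_spec : Claim_equal_errors_wrapper := by
  intro errors _ _
  unfold Spec_errors_wrapper errors_wrapper errors_wrapper_alt
  rw [pv_foldl_eq_modify]
  have hmap : errors.foldl (fun d e => d.modify (pvKey e) [] (· ++ [pvMsg e])) (PySem.Dict.mk []) =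
      (errors.map (fun e => (pvKey e, pvMsg e))).foldl
        (fun d p => d.modify p.1 [] (· ++ [p.2])) (PySem.Dict.mk []) := by
    rw [List.foldl_map]
  rw [hmap]
  set pairs := errors.map (fun e => (pvKey e, pvMsg e)) with hpairs
  set D := pairs.foldl (fun d p => d.modify p.1 [] (· ++ [p.2])) (PySem.Dict.mk []) with hD
  have hkeys : D.keys = PySem.List.dedup (pairs.map (·.1)) := by
    rw [hD]
    have := PySem.Dict.keys_foldl_modify_key pairs (fun p => p.1) []
      (fun _ p => (· ++ [p.2])) (PySem.Dict.mk [])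
    simpa [PySem.Dict.keys, PySem.Set.update, PySem.List.dedup, PySem.Set.ofList] using this
  have hnodup : D.keys.Nodup := by
    rw [hkeys]; exact PySem.List.nodup_dedup _
  rw [pv_items_eq_keys_map D hnodup [], hkeys]
  apply List.map_congr_left
  intro k _
  have hgetD : D.getD k [] = (pairs.filter (fun p => p.1 == k)).map (·.2) := by
    rw [hD]
    have := PySem.Dict.getD_foldl_modify_append pairs (PySem.Dict.mk []) k
    simpa using this
  rw [hgetD]
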